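-- pv_equiv track=rewrite | github.com/jaeyow/ai-python-coding-agent | 02_ai_agent/ai_agent_strands.py | _create_feedback_summary
-- ===== SOURCE A (Python) =====
-- from typing import Dict, Any, List, Optional
--
-- def _create_feedback_summary(validation_results: List[str], issues_count: int) -> str:
--     """Create a structured feedback summary for iterative improvement."""
--     feedback_categories = {
--         "Missing Documentation": [],
--         "Type Hint Issues": [],
--         "Error Handling": [],
--         "Code Quality": [],
--         "Syntax/Compilation": []
--     }
--
--     for msg in validation_results:
--         msg_lower = msg.lower()
--         if "missing docstring" in msg_lower:
--             feedback_categories["Missing Documentation"].append(msg)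
--         elif "missing type hint" in msg_lower or "missing return type hint" in msg_lower:
--             feedback_categories["Type Hint Issues"].append(msg)
--         elif "error handling" in msg_lower:
--             feedback_categories["Error Handling"].append(msg)
--         elif "syntax error" in msg_lower or "compilation error" in msg_lower:
--             feedback_categories["Syntax/Compilation"].append(msg)
--         else:
--             feedback_categories["Code Quality"].append(msg)
--
--     feedback_summary = f"Total Issues: {issues_count}\n\n"
--
--     for category, issues in feedback_categories.items():
--         if issues:
--             feedback_summary += f"**{category}:**\n"
--             for issue in issues[:3]:  # Limit to top 3 issues per category
--                 feedback_summary += f"  - {issue}\n"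
--             if len(issues) > 3:
--                 feedback_summary += f"  - ... and {len(issues) - 3} more\n"
--             feedback_summary += "\n"
--
--     return feedback_summary
-- ===== SOURCE B (Python) =====
-- _RULES = [
--     ("Missing Documentation", ["missing docstring"]),
--     ("Type Hint Issues", ["missing type hint", "missing return type hint"]),
--     ("Error Handling", ["error handling"]),
--     ("Syntax/Compilation", ["syntax error", "compilation error"]),
-- ]
--
-- _ORDER = ["Missing Documentation", "Type Hint Issues", "Error Handling",
--           "Code Quality", "Syntax/Compilation"]
--
--
-- def _classify(msg):
--     ml = msg.lower()
--     for cat, kws in _RULES: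
--         if any(k in ml for k in kws):
--             return cat
--     return "Code Quality"
--
--
-- def _section(category, issues):
--     if not issues:
--         return ""
--     text = f"**{category}:**\n"
--     for issue in issues[:3]:
--         text += f"  - {issue}\n"
--     if len(issues) > 3:
--         text += f"  - ... and {len(issues) - 3} more\n"
--     return text + "\n"
--
--
-- def _create_feedback_summary(validation_results, issues_count):
--     out = f"Total Issues: {issues_count}\n\n"
--     for cat in _ORDER:
--         out += _section(cat, [m for m in validation_results if _classify(m) == cat])
--     return out
-- ===== Notes on version B (the rewrite author's own statement) =====
-- stated objective: alternative
-- what changed: Replaces the hardcoded if/elif chain filling five mutable dict buckets with a data-driven rule table: each message is classified by scanning an ordered (category, keywords) list, and the output is built per category by filtering the messages, so no bucket dictionary is maintained at all.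
import Mathlib
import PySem

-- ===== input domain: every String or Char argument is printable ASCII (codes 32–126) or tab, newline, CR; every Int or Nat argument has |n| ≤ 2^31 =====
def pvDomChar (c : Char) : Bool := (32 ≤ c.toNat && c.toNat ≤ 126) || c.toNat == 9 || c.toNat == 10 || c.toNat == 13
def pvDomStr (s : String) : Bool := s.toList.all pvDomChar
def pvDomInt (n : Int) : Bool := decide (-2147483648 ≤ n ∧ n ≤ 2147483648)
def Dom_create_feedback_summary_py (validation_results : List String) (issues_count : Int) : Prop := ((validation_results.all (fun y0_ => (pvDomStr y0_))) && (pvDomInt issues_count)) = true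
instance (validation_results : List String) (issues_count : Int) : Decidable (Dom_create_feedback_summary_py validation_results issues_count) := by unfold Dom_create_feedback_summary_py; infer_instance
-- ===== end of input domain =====

-- B replaces A's if/elif chain and five mutable dict buckets by an ordered rule table
-- (classify each message by its first matching keyword) and a per-category filter;
-- objective: alternative decomposition, same O(n) cost.

-- ===== PORT A =====
-- A's fixed-key dict of five lists is represented as a 5-tuple of lists in the dict's
-- insertion order; the loop body appends to the matching component exactly as A does.
def pvStepA (b : List String × List String × List String × List String × List String)
    (msg : String) : List String × List String × List String × List String × List String :=
  let ml := PySem.Str.lower msg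
  if PySem.Str.isIn "missing docstring" ml then
    (b.1 ++ [msg], b.2.1, b.2.2.1, b.2.2.2.1, b.2.2.2.2)
  else if PySem.Str.isIn "missing type hint" ml || PySem.Str.isIn "missing return type hint" ml then
    (b.1, b.2.1 ++ [msg], b.2.2.1, b.2.2.2.1, b.2.2.2.2)
  else if PySem.Str.isIn "error handling" ml then
    (b.1, b.2.1, b.2.2.1 ++ [msg], b.2.2.2.1, b.2.2.2.2)
  else if PySem.Str.isIn "syntax error" ml || PySem.Str.isIn "compilation error" ml then
    (b.1, b.2.1, b.2.2.1, b.2.2.2.1, b.2.2.2.2 ++ [msg])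
  else
    (b.1, b.2.1, b.2.2.1, b.2.2.2.1 ++ [msg], b.2.2.2.2)

-- the body of A's output loop ('if issues: …' emitting one category section onto the accumulator)
def pvEmitA (fs : String) (category : String) (issues : List String) : String :=
  if issues = [] then fs
  else
    let fs := fs ++ "**" ++ category ++ ":**\n"
    let fs := (PySem.List.slice issues none (some 3)).foldl
      (fun t issue => t ++ ("  - " ++ issue ++ "\n")) fs
    let fs := if (issues.length : Int) > 3 then
        fs ++ ("  - ... and " ++ PySem.Int.toStr ((issues.length : Int) - 3) ++ " more\n")
      else fs
    fs ++ "\n"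

def create_feedback_summary_py (validation_results : List String) (issues_count : Int) : String :=
  let b := validation_results.foldl pvStepA ([], [], [], [], [])
  let items : List (String × List String) :=
    [("Missing Documentation", b.1), ("Type Hint Issues", b.2.1), ("Error Handling", b.2.2.1),
     ("Code Quality", b.2.2.2.1), ("Syntax/Compilation", b.2.2.2.2)]
  items.foldl (fun fs ci => pvEmitA fs ci.1 ci.2)
    ("Total Issues: " ++ PySem.Int.toStr issues_count ++ "\n\n")

-- ===== PORT B =====
def pvRules : List (String × List String) :=
  [("Missing Documentation", ["missing docstring"]),
   ("Type Hint Issues", ["missing type hint", "missing return type hint"]),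
   ("Error Handling", ["error handling"]),
   ("Syntax/Compilation", ["syntax error", "compilation error"])]

def pvOrder : List String :=
  ["Missing Documentation", "Type Hint Issues", "Error Handling",
   "Code Quality", "Syntax/Compilation"]

def pvClassifyGo (ml : String) : List (String × List String) → String
  | [] => "Code Quality"
  | (cat, kws) :: rest =>
      if kws.any (fun k => PySem.Str.isIn k ml) then cat else pvClassifyGo ml rest

def pvClassify (msg : String) : String := pvClassifyGo (PySem.Str.lower msg) pvRules

def pvSection (category : String) (issues : List String) : String :=
  if issues = [] then ""
  else
    let text := "**" ++ category ++ ":**\n"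
    let text := (PySem.List.slice issues none (some 3)).foldl
      (fun t issue => t ++ ("  - " ++ issue ++ "\n")) text
    let text := if (issues.length : Int) > 3 then
        text ++ ("  - ... and " ++ PySem.Int.toStr ((issues.length : Int) - 3) ++ " more\n")
      else text
    text ++ "\n"

def create_feedback_summary_py_alt (validation_results : List String) (issues_count : Int) : String :=
  pvOrder.foldl
    (fun out cat => out ++ pvSection cat (validation_results.filter (fun m => pvClassify m == cat)))
    ("Total Issues: " ++ PySem.Int.toStr issues_count ++ "\n\n")

-- ===== PRECONDITION & SPEC =====
def Spec_create_feedback_summary_py (validation_results : List String) (issues_count : Int) (out : String) : Prop := out = create_feedback_summary_py_alt validation_results issues_count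
instance (validation_results : List String) (issues_count : Int) (out : String) : Decidable (Spec_create_feedback_summary_py validation_results issues_count out) := by unfold Spec_create_feedback_summary_py; infer_instance

-- ===== CLAIM (what is proved, stated in full; the proofs are below) =====
def Claim_equal_create_feedback_summary_py : Prop := ∀ (validation_results : List String) (issues_count : Int), Dom_create_feedback_summary_py validation_results issues_count → Spec_create_feedback_summary_py validation_results issues_count (create_feedback_summary_py validation_results issues_count)

-- ===== LEMMAS AND PROOFS =====

-- the five filters B uses, named for the invariant
def pvF (cat : String) (vr : List String) : List String :=
  vr.filter (fun m => pvClassify m == cat)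

theorem pvStep_char (bt : List String × List String × List String × List String × List String)
    (m : String) :
    pvStepA bt m =
      ((if pvClassify m == "Missing Documentation" then bt.1 ++ [m] else bt.1),
       (if pvClassify m == "Type Hint Issues" then bt.2.1 ++ [m] else bt.2.1),
       (if pvClassify m == "Error Handling" then bt.2.2.1 ++ [m] else bt.2.2.1),
       (if pvClassify m == "Code Quality" then bt.2.2.2.1 ++ [m] else bt.2.2.2.1),
       (if pvClassify m == "Syntax/Compilation" then bt.2.2.2.2 ++ [m] else bt.2.2.2.2)) := by
  simp only [pvStepA, pvClassify, pvClassifyGo, pvRules, List.any_cons, List.any_nil,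
    Bool.or_false]
  split_ifs <;> simp_all

theorem pvFilter_comp (xs : List String) (m : String) (rest : List String) (cat : String) :
    (if pvClassify m == cat then xs ++ [m] else xs) ++ pvF cat rest = xs ++ pvF cat (m :: rest) := by
  simp only [pvF, List.filter_cons]
  by_cases h : (pvClassify m == cat) = true <;> simp [h]

theorem pvBuckets_eq (vr : List String) (a b c d e : List String) :
    vr.foldl pvStepA (a, b, c, d, e) =
      (a ++ pvF "Missing Documentation" vr, b ++ pvF "Type Hint Issues" vr,
       c ++ pvF "Error Handling" vr, d ++ pvF "Code Quality" vr,
       e ++ pvF "Syntax/Compilation" vr) := by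
  induction vr generalizing a b c d e with
  | nil => simp [pvF]
  | cons m rest ih =>
    rw [List.foldl_cons, pvStep_char, ih]
    simp only [pvFilter_comp]

theorem pvFoldl_hoist (l : List String) (s t : String) :
    l.foldl (fun acc issue => acc ++ ("  - " ++ issue ++ "\n")) (s ++ t) =
      s ++ l.foldl (fun acc issue => acc ++ ("  - " ++ issue ++ "\n")) t := by
  induction l generalizing t with
  | nil => rfl
  | cons x xs ih =>
    simp only [List.foldl]
    rw [String.append_assoc]
    exact ih _

theorem pvEmitA_eq (fs category : String) (issues : List String) :
    pvEmitA fs category issues = fs ++ pvSection category issues := by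
  unfold pvEmitA pvSection
  by_cases h : issues = []
  · simp [h]
  · simp only [h, if_false]
    rw [show fs ++ "**" ++ category ++ ":**\n" = fs ++ ("**" ++ category ++ ":**\n") by
      simp [String.append_assoc]]
    rw [pvFoldl_hoist]
    by_cases h3 : (issues.length : Int) > 3 <;> simp [h3, String.append_assoc]

-- ===== VERDICT (by name: the statement is the Claim_ definition above) =====
theorem create_feedback_summary_py_spec : Claim_equal_create_feedback_summary_py := by
  intro vr ic _
  show create_feedback_summary_py vr ic = create_feedback_summary_py_alt vr ic
  unfold create_feedback_summary_py create_feedback_summary_py_alt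
  rw [pvBuckets_eq]
  simp only [List.nil_append, List.foldl, pvOrder, pvEmitA_eq, pvF]
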